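-- pv_equiv track=rewrite | github.com/MattLangsenkamp/tangent-s | src/python/ranking/scoring_helper.py | match_leftmost_scores
-- ===== SOURCE A (Python) =====
-- def match_leftmost_scores(location, max_depth, n_types, c_type):
--     match_score = [0] * max_depth
--
--     current_depth = 0
--     loc_pos = 0
--     baseline_pos = 0
--     while loc_pos < len(location) and current_depth < max_depth:
--         if location[loc_pos] == "n":
--             baseline_pos += 1
--         else:
--             # change of baseline, write current, reset next
--             match_score[current_depth] = -(baseline_pos * (n_types + 1) + c_type)
--
--             baseline_pos = 0
--             current_depth += 1
--
--         loc_pos += 1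
--
--     if current_depth < max_depth:
--         # write current score ...
--         match_score[current_depth] = -(baseline_pos * (n_types + 1) + c_type)
--
--     return match_score
-- ===== SOURCE B (Python) =====
-- def match_leftmost_scores(location, max_depth, n_types, c_type):
--     # Pass 1: parse the whole location into a table of n-run lengths
--     # (one entry per segment between non-'n' delimiters, empties included).
--     counts = [0]
--     for ch in location:
--         if ch == "n":
--             counts[-1] += 1
--         else:
--             counts.append(0)
--     # Pass 2: map the first min(max_depth, len(counts)) run lengths to scores.
--     score = [0] * max_depth
--     for d in range(min(max_depth, len(counts))):
--         score[d] = -(counts[d] * (n_types + 1) + c_type)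
--     return score
-- ===== Notes on version B (the rewrite author's own statement) =====
-- stated objective: alternative
-- what changed: Replaced the single-pass index state machine (baseline_pos/current_depth with an in-loop early stop and a conditional trailing write) by a two-pass parse-then-map: first parse the whole location into a table of n-run lengths, then map the first min(max_depth, #runs) lengths to scores into a preallocated list.
import Mathlib
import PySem

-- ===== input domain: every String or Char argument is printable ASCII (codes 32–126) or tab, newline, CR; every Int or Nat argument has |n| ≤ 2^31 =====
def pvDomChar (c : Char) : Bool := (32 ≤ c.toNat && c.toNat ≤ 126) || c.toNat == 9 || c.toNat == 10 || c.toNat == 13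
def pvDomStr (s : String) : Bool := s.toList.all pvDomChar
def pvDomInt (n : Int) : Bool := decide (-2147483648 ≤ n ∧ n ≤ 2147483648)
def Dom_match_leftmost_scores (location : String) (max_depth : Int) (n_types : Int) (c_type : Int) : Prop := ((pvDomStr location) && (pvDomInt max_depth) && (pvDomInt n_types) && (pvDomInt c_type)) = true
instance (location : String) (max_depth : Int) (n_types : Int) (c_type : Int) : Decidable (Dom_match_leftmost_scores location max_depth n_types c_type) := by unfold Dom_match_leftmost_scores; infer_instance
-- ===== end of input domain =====

-- Re-implementation B: two-pass parse-into-run-length-table then bounded map, replacing A's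
-- single-pass index state machine with early stop and conditional trailing write (alternative decomposition, same cost).


-- ===== PORT A =====
-- A's while loop: state (match_score, current_depth, baseline_pos), stops at end of
-- string or when current_depth reaches max_depth.
def aLoop (md nt ct : Int) : List Char → List Int → Nat → Int → List Int × Nat × Int
  | [], ms, cd, bp => (ms, cd, bp)
  | c :: rest, ms, cd, bp =>
    if (cd : Int) < md then
      if c = 'n' then aLoop md nt ct rest ms cd (bp + 1)
      else aLoop md nt ct rest (ms.set cd (-(bp * (nt + 1) + ct))) (cd + 1) 0
    else (ms, cd, bp)

def match_leftmost_scores (location : String) (max_depth : Int) (n_types : Int) (c_type : Int) : List Int :=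
  let ms := List.replicate max_depth.toNat (0 : Int)   -- [0] * max_depth ([] when max_depth ≤ 0)
  let r := aLoop max_depth n_types c_type location.toList ms 0 0
  if (r.2.1 : Int) < max_depth then r.1.set r.2.1 (-(r.2.2 * (n_types + 1) + c_type)) else r.1

-- ===== PORT B =====
-- Pass 1 of Source B: counts = [0]; for ch: counts[-1] += 1 / counts.append(0).
def bCounts (cs : List Char) : List Int :=
  cs.foldl (fun cnts ch =>
    if ch = 'n' then cnts.dropLast ++ [cnts.getLastD 0 + 1] else cnts ++ [0]) [0]

def match_leftmost_scores_alt (location : String) (max_depth : Int) (n_types : Int) (c_type : Int) : List Int :=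
  let counts := bCounts location.toList
  let score := List.replicate max_depth.toNat (0 : Int)   -- [0] * max_depth
  -- Pass 2: for d in range(min(max_depth, len(counts))): score[d] = -(counts[d]*(n_types+1)+c_type)
  -- counts[d] ported as pyGetD (exact: 0 ≤ d < len(counts) inside the range).
  (PySem.List.pyRange 0 (min max_depth (counts.length : Int)) 1).foldl
    (fun sc d => sc.set d.toNat (-(PySem.List.pyGetD counts d 0 * (n_types + 1) + c_type))) score

-- ===== PRECONDITION & SPEC =====
def Spec_match_leftmost_scores (location : String) (max_depth : Int) (n_types : Int) (c_type : Int) (out : List Int) : Prop := out = match_leftmost_scores_alt location max_depth n_types c_type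
instance (location : String) (max_depth : Int) (n_types : Int) (c_type : Int) (out : List Int) : Decidable (Spec_match_leftmost_scores location max_depth n_types c_type out) := by unfold Spec_match_leftmost_scores; infer_instance

-- ===== CLAIM (what is proved, stated in full; the proofs are below) =====
def Claim_equal_match_leftmost_scores : Prop := ∀ (location : String) (max_depth : Int) (n_types : Int) (c_type : Int), Dom_match_leftmost_scores location max_depth n_types c_type → Spec_match_leftmost_scores location max_depth n_types c_type (match_leftmost_scores location max_depth n_types c_type)

-- ===== LEMMAS AND PROOFS =====

-- run lengths of cs, the current run having already length bp
def runs : List Char → Int → List Int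
  | [], bp => [bp]
  | c :: rest, bp => if c = 'n' then runs rest (bp + 1) else bp :: runs rest 0

-- write g l[0], g l[1], … at indices cd, cd+1, …, stopping at the first index out of range
def fill (nt ct : Int) : List Int → Nat → List Int → List Int
  | ms, _, [] => ms
  | ms, cd, x :: xs =>
    if cd < ms.length then fill nt ct (ms.set cd (-(x * (nt + 1) + ct))) (cd + 1) xs else ms

theorem fill_stop (nt ct : Int) (l ms : List Int) (cd : Nat) (h : ms.length ≤ cd) :
    fill nt ct ms cd l = ms := by
  cases l with
  | nil => rfl
  | cons x xs => simp [fill, Nat.not_lt.mpr h]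

theorem aLoop_eq_fill (md nt ct : Int) (cs : List Char) :
    ∀ (ms : List Int) (cd : Nat) (bp : Int), ms.length = md.toNat →
    (let r := aLoop md nt ct cs ms cd bp;
     if (r.2.1 : Int) < md then r.1.set r.2.1 (-(r.2.2 * (nt + 1) + ct)) else r.1)
      = fill nt ct ms cd (runs cs bp) := by
  induction cs with
  | nil =>
    intro ms cd bp hlen
    by_cases h : (cd : Int) < md
    · have : cd < ms.length := by omega
      simp [aLoop, runs, fill, h, this]
    · have : ¬ cd < ms.length := by omega
      simp [aLoop, runs, fill, h, this]
  | cons c rest ih =>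
    intro ms cd bp hlen
    by_cases h : (cd : Int) < md
    · by_cases hc : c = 'n'
      · simpa [aLoop, runs, h, hc] using ih ms cd (bp + 1) hlen
      · have hcd : cd < ms.length := by omega
        have := ih (ms.set cd (-(bp * (nt + 1) + ct))) (cd + 1) 0 (by simpa using hlen)
        simpa [aLoop, runs, h, hc, fill, hcd] using this
    · have hcd : ¬ cd < ms.length := by omega
      have hstop : fill nt ct ms cd (runs (c :: rest) bp) = ms := by
        apply fill_stop; omega
      simp [aLoop, h, hstop]

theorem bCounts_eq_runs_aux (cs : List Char) :
    ∀ (pre : List Int) (bp : Int),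
    cs.foldl (fun cnts ch =>
      if ch = 'n' then cnts.dropLast ++ [cnts.getLastD 0 + 1] else cnts ++ [0]) (pre ++ [bp])
      = pre ++ runs cs bp := by
  induction cs with
  | nil => intro pre bp; simp [runs]
  | cons c rest ih =>
    intro pre bp
    by_cases hc : c = 'n'
    · simpa [hc, runs, List.getLastD_concat] using ih pre (bp + 1)
    · have := ih (pre ++ [bp]) 0
      simpa [hc, runs] using this

theorem bCounts_eq_runs (cs : List Char) : bCounts cs = runs cs 0 := by
  have := bCounts_eq_runs_aux cs [] 0
  simpa [bCounts] using this

theorem bFold_eq_fill (md nt ct : Int) (counts : List Int) :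
    ∀ (n : Nat) (a : Nat) (ms : List Int), counts.length - a = n → ms.length = md.toNat →
    (PySem.List.pyRange (a : Int) (min md (counts.length : Int)) 1).foldl
      (fun sc d => sc.set d.toNat (-(PySem.List.pyGetD counts d 0 * (nt + 1) + ct))) ms
      = fill nt ct ms a (counts.drop a) := by
  intro n
  induction n with
  | zero =>
    intro a ms hn hlen
    have ha : counts.length ≤ a := by omega
    have hr : ¬ ((a : Int) < min md (counts.length : Int)) := by omega
    have hre : PySem.List.pyRange (a : Int) (min md (counts.length : Int)) 1 = [] := by
      simp [PySem.List.pyRange, hr]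
    rw [hre, List.drop_eq_nil_of_le ha]
    rfl
  | succ n ih =>
    intro a ms hn hlen
    by_cases hr : (a : Int) < min md (counts.length : Int)
    · have halen : a < counts.length := by omega
      rw [PySem.List.pyRange_one_cons hr, List.foldl_cons]
      have hget : PySem.List.pyGetD counts (a : Int) 0 = counts[a] := by
        rw [PySem.List.pyGetD_natCast]
        exact List.getD_eq_getElem counts 0 halen
      rw [List.drop_eq_getElem_cons halen]
      show _ = fill nt ct ms a (counts[a] :: counts.drop (a + 1))
      rw [fill, if_pos (by omega)]
      have := ih (a + 1) (ms.set a (-(counts[a] * (nt + 1) + ct))) (by omega) (by simpa using hlen)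
      simpa [hget] using this
    · have hre : PySem.List.pyRange (a : Int) (min md (counts.length : Int)) 1 = [] := by
        simp [PySem.List.pyRange, hr]
      rw [hre]
      rcases Nat.lt_or_ge a counts.length with h | h
      · rw [fill_stop nt ct _ ms a (by omega)]
        rfl
      · rw [List.drop_eq_nil_of_le h]
        rfl

-- ===== VERDICT (by name: the statement is the Claim_ definition above) =====
theorem match_leftmost_scores_spec : Claim_equal_match_leftmost_scores := by
  intro loc md nt ct _
  unfold Spec_match_leftmost_scores match_leftmost_scores match_leftmost_scores_alt
  rw [bCounts_eq_runs]
  rw [aLoop_eq_fill md nt ct loc.toList _ 0 0 (by simp)]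
  have := bFold_eq_fill md nt ct (runs loc.toList 0) ((runs loc.toList 0).length) 0
      (List.replicate md.toNat (0 : Int)) (by omega) (by simp)
  simpa using this.symm
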